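-- pv_equiv track=rewrite | github.com/nordemja/AdventOfCode2019 | Day4.py | meetRequirementsPartTwo
-- ===== SOURCE A (Python) =====
-- from collections import Counter
--
-- def isInOrder(lst):
--
--     '''
--     FUNCTION_NAME = isInOrder
--
--     ARGUMENTS = lst
--
--     DESCRIPTION =
--
--     '''
--
--     previous = lst[0]
--
--     for num in lst:
--         if num < previous:
--             return False
--         previous = num
--     return True
--
-- def twoConesecutiveEqualValues(lst):
--     for i in range(len(lst) - 1):
--         if lst[i] == lst[i+1]:
--             return True
--     return False
--
-- def partTwo(lst):
--     a = Counter(lst)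
--     for letter in lst:
--         if a[letter] == 2:
--             return True
--     return False
--
-- def meetRequirementsPartTwo(lst):
--     fitsRequirements = 0
--     for each in lst:
--         for x in range(len(each)-1):
--             if twoConesecutiveEqualValues(each) and isInOrder(each) and partTwo(each):
--                 fitsRequirements += 1
--                 break
--
--     return fitsRequirements
-- ===== SOURCE B (Python) =====
-- def _validTwo(each):
--     # single fused pass: non-decreasing check + run-length tracking,
--     # counted iff non-decreasing and some run has length exactly 2
--     if not each:
--         return False
--     run = 1
--     has_pair = False
--     prev = each[0]
--     for x in each[1:]:
--         if x < prev:
--             return False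
--         if x == prev:
--             run += 1
--         else:
--             if run == 2:
--                 has_pair = True
--             run = 1
--         prev = x
--     return run == 2 or has_pair
--
-- def meetRequirementsPartTwo(lst):
--     fits = 0
--     for each in lst:
--         if _validTwo(each):
--             fits += 1
--     return fits
-- ===== Notes on version B (the rewrite author's own statement) =====
-- stated objective: faster
-- what changed: Replaced A's per-element trio of scans (adjacent-pair scan, order scan, Counter build plus membership scan), re-evaluated on every iteration of a redundant range loop when the condition fails, by a single fused pass per inner list that checks non-decreasing order and tracks run lengths, counting iff some run has length exactly 2.
import Mathlib
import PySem

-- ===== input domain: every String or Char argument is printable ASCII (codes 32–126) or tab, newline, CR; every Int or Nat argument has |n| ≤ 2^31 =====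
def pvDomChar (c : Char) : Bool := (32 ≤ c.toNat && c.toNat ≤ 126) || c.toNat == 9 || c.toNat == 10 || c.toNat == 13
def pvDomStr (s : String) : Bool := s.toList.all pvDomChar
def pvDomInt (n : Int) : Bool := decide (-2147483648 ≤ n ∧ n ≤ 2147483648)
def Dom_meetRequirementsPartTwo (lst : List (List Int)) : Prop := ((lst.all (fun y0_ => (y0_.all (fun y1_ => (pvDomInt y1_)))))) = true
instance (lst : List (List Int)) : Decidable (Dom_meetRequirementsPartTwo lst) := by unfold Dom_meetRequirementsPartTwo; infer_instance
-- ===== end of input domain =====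

-- B fuses A's three separate scans per inner list (adjacent-pair scan, order scan,
-- Counter + membership scan, repeated inside a redundant range loop) into a single
-- run-length pass; objective: faster (one pass instead of repeated scans).

-- ===== PORT A =====
-- isInOrder: 'previous = lst[0]' raises on [], but A only ever calls it on lists of
-- length ≥ 2 (guarded by the range loop and short-circuit), so headD 0 is exact there.
def pvIsInOrder (lst : List Int) : Bool :=
  (lst.foldl
    (fun (st : Bool × Int) num =>
      if st.1 = false then st
      else if num < st.2 then (false, st.2)
      else (true, num))
    (true, lst.headD 0)).1

def pvTwoConsec (lst : List Int) : Bool :=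
  (List.range (lst.length - 1)).any (fun i => lst.getD i 0 == lst.getD (i + 1) 0)

def pvPartTwo (lst : List Int) : Bool :=
  let a := PySem.Dict.counter lst
  lst.any (fun letter => a.getD letter 0 == 2)

def meetRequirementsPartTwo (lst : List (List Int)) : Int :=
  lst.foldl
    (fun fits each =>
      ((List.range (each.length - 1)).foldl
        (fun (st : Int × Bool) _x =>
          if st.2 then st
          else if pvTwoConsec each && pvIsInOrder each && pvPartTwo each then (st.1 + 1, true)
          else st)
        (fits, false)).1)
    0

-- ===== PORT B =====
-- the early-return for-loop of _validTwo, as structural recursion over each[1:]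
def pvScan (prev run : Int) (hasPair : Bool) : List Int → Bool
  | [] => run == 2 || hasPair
  | x :: rest =>
    if x < prev then false
    else if x == prev then pvScan x (run + 1) hasPair rest
    else pvScan x 1 (if run == 2 then true else hasPair) rest

def pvValidTwo (each : List Int) : Bool :=
  match each with
  | [] => false
  | x :: rest => pvScan x 1 false rest

def meetRequirementsPartTwo_alt (lst : List (List Int)) : Int :=
  lst.foldl (fun fits each => if pvValidTwo each then fits + 1 else fits) 0

-- ===== PRECONDITION & SPEC =====
def Spec_meetRequirementsPartTwo (lst : List (List Int)) (out : Int) : Prop := out = meetRequirementsPartTwo_alt lst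
instance (lst : List (List Int)) (out : Int) : Decidable (Spec_meetRequirementsPartTwo lst out) := by unfold Spec_meetRequirementsPartTwo; infer_instance

-- ===== CLAIM (what is proved, stated in full; the proofs are below) =====
def Claim_equal_meetRequirementsPartTwo : Prop := ∀ (lst : List (List Int)), Dom_meetRequirementsPartTwo lst → Spec_meetRequirementsPartTwo lst (meetRequirementsPartTwo lst)

-- ===== LEMMAS AND PROOFS =====

-- A's per-element condition, with the length guard supplied by the range loop
def pvCondA (e : List Int) : Bool :=
  decide (2 ≤ e.length) && (pvTwoConsec e && pvIsInOrder e && pvPartTwo e)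

-- once broken, A's inner range loop keeps its state
theorem pv_broken_fold (c : Bool) (l : List Nat) (st : Int × Bool) (h : st.2 = true) :
    l.foldl (fun (st : Int × Bool) _ => if st.2 then st else if c then (st.1 + 1, true) else st) st = st := by
  induction l with
  | nil => rfl
  | cons y ys ih => simp [List.foldl_cons, h, ih]

-- A's inner break-loop collapses to one conditional increment
theorem pv_inner_fold (c : Bool) (l : List Nat) (acc : Int) :
    (l.foldl (fun (st : Int × Bool) _ => if st.2 then st else if c then (st.1 + 1, true) else st)
      (acc, false)).1 = if l ≠ [] ∧ c = true then acc + 1 else acc := by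
  cases c with
  | false =>
    have h : ∀ (l : List Nat), l.foldl (fun (st : Int × Bool) _ => if st.2 then st else if false then (st.1 + 1, true) else st) (acc, false) = (acc, false) := by
      intro l; induction l with
      | nil => rfl
      | cons y ys ih => simpa using ih
    rw [h l]; simp
  | true =>
    cases l with
    | nil => simp
    | cons y ys =>
      rw [List.foldl_cons]
      have h1 : (if ((acc, false) : Int × Bool).2 = true then ((acc, false) : Int × Bool)
          else if true = true then (((acc, false) : Int × Bool).1 + 1, true) else ((acc, false) : Int × Bool)) = ((acc + 1 : Int), true) := by simp
      rw [h1, pv_broken_fold true ys (acc + 1, true) rfl]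
      simp

-- isInOrder's fold, once false, stays false
theorem pv_order_stuck (l : List Int) (q : Int) :
    l.foldl (fun (st : Bool × Int) num =>
      if st.1 = false then st
      else if num < st.2 then (false, st.2)
      else (true, num)) (false, q) = (false, q) := by
  induction l with
  | nil => rfl
  | cons z zs ih => simpa using ih

theorem pv_order_aux (l : List Int) : ∀ p : Int,
    (l.foldl (fun (st : Bool × Int) num =>
        if st.1 = false then st
        else if num < st.2 then (false, st.2)
        else (true, num)) (true, p)).1 = true ↔ List.IsChain (· ≤ ·) (p :: l) := by
  induction l with
  | nil => intro p; simp [List.isChain_singleton]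
  | cons y ys ih =>
    intro p
    by_cases hy : y < p
    · simp only [List.foldl_cons, hy, if_true, if_neg (by simp : ¬(true = false)), pv_order_stuck]
      simp [List.isChain_cons_cons]
      intro h; omega
    · simp only [List.foldl_cons, hy, if_false, if_neg (by simp : ¬(true = false))]
      rw [ih y, List.isChain_cons_cons]
      constructor
      · intro h; exact ⟨by omega, h⟩
      · intro h; exact h.2

theorem pv_isInOrder_iff (e : List Int) : pvIsInOrder e = true ↔ List.IsChain (· ≤ ·) e := by
  cases e with
  | nil => simp [pvIsInOrder, List.isChain_nil]
  | cons x rest =>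
    unfold pvIsInOrder
    simp only [List.headD_cons]
    rw [List.foldl_cons]
    have hstep : (if ((true, x) : Bool × Int).1 = false then ((true, x) : Bool × Int)
        else if x < ((true, x) : Bool × Int).2 then (false, ((true, x) : Bool × Int).2)
        else (true, x)) = ((true, x) : Bool × Int) := by simp
    rw [hstep]
    exact pv_order_aux rest x

-- partTwo: some element has Counter-count exactly 2
theorem pv_partTwo_iff (e : List Int) : pvPartTwo e = true ↔ ∃ c ∈ e, e.count c = 2 := by
  unfold pvPartTwo
  simp only [PySem.Dict.getD_counter, List.any_eq_true, beq_iff_eq]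
  constructor
  · rintro ⟨c, hc, h2⟩; exact ⟨c, hc, by exact_mod_cast h2⟩
  · rintro ⟨c, hc, h2⟩; exact ⟨c, hc, by exact_mod_cast h2⟩

-- twoConsecutiveEqualValues: some adjacent pair is equal
theorem pv_twoConsec_iff (e : List Int) :
    pvTwoConsec e = true ↔ ∃ i, ∃ _ : i + 1 < e.length, e[i] = e[i + 1] := by
  unfold pvTwoConsec
  simp only [List.any_eq_true, List.mem_range, beq_iff_eq]
  constructor
  · rintro ⟨i, hi, hii⟩
    have h1 : i + 1 < e.length := by omega
    refine ⟨i, h1, ?_⟩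
    rwa [List.getD_eq_getElem e 0 (by omega), List.getD_eq_getElem e 0 h1] at hii
  · rintro ⟨i, h1, hii⟩
    refine ⟨i, by omega, ?_⟩
    rwa [List.getD_eq_getElem e 0 (by omega), List.getD_eq_getElem e 0 h1]

-- chain(≤) + an element of count exactly 2 forces an adjacent equal pair
theorem pv_adj_of_count_two (e : List Int) (hc : List.IsChain (· ≤ ·) e)
    (c : Int) (h2 : e.count c = 2) : ∃ i, ∃ _ : i + 1 < e.length, e[i] = e[i + 1] := by
  by_contra h
  push_neg at h
  have hne : List.IsChain (· ≠ ·) e := by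
    rw [List.isChain_iff_getElem] at hc ⊢
    intro i hi
    exact h i hi
  have hlt : List.IsChain (· < ·) e := by
    rw [List.isChain_iff_getElem] at hc hne ⊢
    intro i hi
    exact lt_of_le_of_ne (hc i hi) (hne i hi)
  have hpw : List.Pairwise (· < ·) e := (List.isChain_iff_pairwise).mp hlt
  have hnd : e.Nodup := hpw.imp (fun hab => ne_of_lt hab)
  have := (List.nodup_iff_count_le_one.mp hnd) c
  omega

-- the fused scan, characterised: order of the whole prefix + "some run has length exactly 2"
-- phrased as a count-2 element of the virtual list (run copies of prev, then the rest)
theorem pv_scan_iff (rest : List Int) : ∀ (prev run : Int) (hp : Bool), 1 ≤ run →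
    (pvScan prev run hp rest = true ↔
      List.IsChain (· ≤ ·) (prev :: rest) ∧
       (hp = true ∨ ∃ c ∈ prev :: rest,
          (List.replicate run.toNat prev ++ rest).count c = 2)) := by
  induction rest with
  | nil =>
    intro prev run hp hrun
    simp only [pvScan, List.append_nil, Bool.or_eq_true, beq_iff_eq]
    constructor
    · rintro (h2 | h)
      · exact ⟨List.isChain_singleton _, Or.inr ⟨prev, by simp, by
          rw [List.count_replicate_self]; omega⟩⟩
      · exact ⟨List.isChain_singleton _, Or.inl h⟩
    · rintro ⟨-, (h | ⟨c, hc, hcount⟩)⟩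
      · exact Or.inr h
      · left
        simp only [List.mem_singleton] at hc
        subst hc
        rw [List.count_replicate_self] at hcount
        omega
  | cons x rs ih =>
    intro prev run hp hrun
    by_cases hlt : x < prev
    · simp only [pvScan, hlt, if_true, false_iff, not_and, Bool.false_eq_true]
      intro hch
      exact absurd (List.isChain_cons_cons.mp hch).1 (by omega)
    · by_cases heq : x = prev
      · subst heq
        simp only [pvScan, hlt, if_false, beq_self_eq_true, if_true]
        rw [ih x (run + 1) hp (by omega)]
        have hl : List.replicate (run + 1).toNat x ++ rs =
            List.replicate run.toNat x ++ (x :: rs) := by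
          have : (run + 1).toNat = run.toNat + 1 := by omega
          rw [this, List.replicate_succ']
          simp
        rw [hl]
        constructor
        · rintro ⟨hch, h⟩
          refine ⟨List.isChain_cons_cons.mpr ⟨le_refl x, hch⟩, ?_⟩
          rcases h with h | ⟨c, hc, hcount⟩
          · exact Or.inl h
          · exact Or.inr ⟨c, by simp at hc ⊢; tauto, hcount⟩
        · rintro ⟨hch, h⟩
          refine ⟨(List.isChain_cons_cons.mp hch).2, ?_⟩
          rcases h with h | ⟨c, hc, hcount⟩
          · exact Or.inl h
          · exact Or.inr ⟨c, by simp at hc ⊢; tauto, hcount⟩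
      · have hgt : prev < x := by
          rcases lt_trichotomy x prev with h | h | h
          · exact absurd h hlt
          · exact absurd h heq
          · exact h
        simp only [pvScan, hlt, if_false, beq_iff_eq, heq, if_neg heq]
        rw [ih x 1 (if run = 2 then true else hp) (le_refl 1)]
        have hrepl : List.replicate (1 : Int).toNat x ++ rs = x :: rs := by simp
        rw [hrepl]
        constructor
        · rintro ⟨hch, h⟩
          have hge : ∀ y ∈ x :: rs, x ≤ y := by
            intro y hy
            rcases List.mem_cons.mp hy with h' | h'
            · subst h'; exact le_refl y
            · exact List.IsChain.rel_cons hch h'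
          refine ⟨List.isChain_cons_cons.mpr ⟨le_of_lt hgt, hch⟩, ?_⟩
          have hnotmem : prev ∉ x :: rs := fun hm => absurd (hge prev hm) (by omega)
          rcases h with h | ⟨c, hc, hcount⟩
          · by_cases h2 : run = 2
            · right
              refine ⟨prev, by simp, ?_⟩
              rw [List.count_append, List.count_replicate_self,
                List.count_eq_zero.mpr hnotmem]
              omega
            · left; simpa [h2] using h
          · right
            refine ⟨c, List.mem_cons_of_mem _ hc, ?_⟩
            have hcne : c ≠ prev := fun hce => hnotmem (hce ▸ hc)
            rw [List.count_append, List.count_replicate,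
              if_neg (show ¬ (prev == c) = true by simp only [beq_iff_eq]; exact fun h => hcne h.symm)]
            simpa using hcount
        · rintro ⟨hch, h⟩
          have hch' := (List.isChain_cons_cons.mp hch).2
          have hge : ∀ y ∈ x :: rs, x ≤ y := by
            intro y hy
            rcases List.mem_cons.mp hy with h' | h'
            · subst h'; exact le_refl y
            · exact List.IsChain.rel_cons hch' h'
          have hnotmem : prev ∉ x :: rs := fun hm => absurd (hge prev hm) (by omega)
          refine ⟨hch', ?_⟩
          rcases h with h | ⟨c, hc, hcount⟩
          · left; split <;> simp [h]
          · rcases List.mem_cons.mp hc with hce | hcm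
            · subst hce
              rw [List.count_append, List.count_replicate_self,
                List.count_eq_zero.mpr hnotmem] at hcount
              have : run = 2 := by omega
              left; simp [this]
            · right
              refine ⟨c, hcm, ?_⟩
              have hcne : c ≠ prev := fun hce => hnotmem (hce ▸ hcm)
              rw [List.count_append, List.count_replicate,
                if_neg (show ¬ (prev == c) = true by simp only [beq_iff_eq]; exact fun h => hcne h.symm)] at hcount
              simpa using hcount

theorem pv_valid_iff (e : List Int) :
    pvValidTwo e = true ↔ List.IsChain (· ≤ ·) e ∧ ∃ c ∈ e, e.count c = 2 := by
  cases e with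
  | nil => simp [pvValidTwo]
  | cons x rest =>
    unfold pvValidTwo
    rw [pv_scan_iff rest x 1 false (le_refl 1)]
    simp

theorem pv_cond_eq (e : List Int) : pvCondA e = pvValidTwo e := by
  rw [Bool.eq_iff_iff]
  unfold pvCondA
  simp only [Bool.and_eq_true, decide_eq_true_eq]
  rw [pv_valid_iff, pv_twoConsec_iff, pv_isInOrder_iff, pv_partTwo_iff]
  constructor
  · rintro ⟨-, ⟨-, hord⟩, hcnt⟩
    exact ⟨hord, hcnt⟩
  · rintro ⟨hord, c, hc, hcnt⟩
    refine ⟨?_, ⟨pv_adj_of_count_two e hord c hcnt, hord⟩, ⟨c, hc, hcnt⟩⟩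
    have h1 : e.count c ≤ e.length := List.count_le_length
    omega

theorem pv_fold_eq (lst : List (List Int)) : ∀ acc : Int,
    lst.foldl
      (fun fits each =>
        ((List.range (each.length - 1)).foldl
          (fun (st : Int × Bool) _x =>
            if st.2 then st
            else if pvTwoConsec each && pvIsInOrder each && pvPartTwo each then (st.1 + 1, true)
            else st)
          (fits, false)).1)
      acc
    = lst.foldl (fun fits each => if pvValidTwo each then fits + 1 else fits) acc := by
  induction lst with
  | nil => intro acc; rfl
  | cons e es ih =>
    intro acc
    simp only [List.foldl_cons]
    rw [pv_inner_fold]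
    have hc : (List.range (e.length - 1) ≠ [] ∧ (pvTwoConsec e && pvIsInOrder e && pvPartTwo e) = true) ↔ pvValidTwo e = true := by
      rw [← pv_cond_eq]
      unfold pvCondA
      simp [List.range_eq_nil]
      omega
    by_cases hv : pvValidTwo e = true
    · rw [if_pos (hc.mpr hv), hv, if_pos rfl, ih]
    · rw [if_neg (fun h => hv (hc.mp h))]
      have : pvValidTwo e = false := by simpa using hv
      rw [this]
      simp only [Bool.false_eq_true, if_false]
      exact ih acc

-- ===== VERDICT (by name: the statement is the Claim_ definition above) =====
theorem meetRequirementsPartTwo_spec : Claim_equal_meetRequirementsPartTwo := by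
  intro lst _
  unfold Spec_meetRequirementsPartTwo meetRequirementsPartTwo meetRequirementsPartTwo_alt
  exact pv_fold_eq lst 0
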